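-- pv_equiv track=rewrite | github.com/bryan531/samples | PageRank.py | determine_doc_type
-- ===== SOURCE A (Python) =====
-- def determine_doc_type(index, file_str):
-- 	'''Looks for the first appearance of COSC, MATH or MTED in the list of words
-- 	'''
-- 	for i in range(index, -1, -1):
-- 		if len(file_str[i]) == 4:
-- 			if file_str[i] == "COSC":
-- 				return "C"
-- 			elif file_str[i] == "MATH":
-- 				return "M"
-- 			elif file_str[i] == "MTED":
-- 				return "E"
-- ===== SOURCE B (Python) =====
-- def determine_doc_type(index, file_str):
--     '''Forward scan keeping the last keyword seen up to `index`
--     (last forward match == first backward match).'''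
--     result = None
--     for i in range(index + 1):
--         s = file_str[i]
--         if s == "COSC":
--             result = "C"
--         elif s == "MATH":
--             result = "M"
--         elif s == "MTED":
--             result = "E"
--     return result
-- ===== Notes on version B (the rewrite author's own statement) =====
-- stated objective: alternative
-- what changed: Replaces A's backward early-return scan from index down to 0 with a forward accumulator scan over 0..index that keeps the last keyword seen (last forward match = first backward match), dropping the redundant len==4 guard.
import Mathlib
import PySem

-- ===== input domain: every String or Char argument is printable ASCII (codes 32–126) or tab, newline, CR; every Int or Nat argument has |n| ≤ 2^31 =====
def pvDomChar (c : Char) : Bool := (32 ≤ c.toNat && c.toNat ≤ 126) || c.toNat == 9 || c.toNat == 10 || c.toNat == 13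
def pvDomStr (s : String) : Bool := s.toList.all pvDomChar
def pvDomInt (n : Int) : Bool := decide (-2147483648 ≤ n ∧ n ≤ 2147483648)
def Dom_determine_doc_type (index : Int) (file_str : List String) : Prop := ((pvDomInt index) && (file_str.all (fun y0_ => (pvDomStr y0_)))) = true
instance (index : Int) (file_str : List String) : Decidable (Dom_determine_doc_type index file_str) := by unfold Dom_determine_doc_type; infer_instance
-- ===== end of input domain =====

-- B replaces A's backward early-return scan with a forward accumulator scan over 0..index
-- keeping the last keyword seen (alternative decomposition; same cost).


-- ===== PORT A =====
-- A's loop body at index i: on a hit return the code, otherwise continue with k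
-- (file_str[i] out of range = IndexError, excluded by Pre_; the port returns none there).
def pvACheck (file_str : List String) (i : Nat) (k : Option String) : Option String :=
  match PySem.List.pyGet? file_str (i : Int) with
  | none => none
  | some s =>
    if PySem.Str.len s = 4 then
      if s = "COSC" then some "C"
      else if s = "MATH" then some "M"
      else if s = "MTED" then some "E"
      else k
    else k

-- for i in range(index, -1, -1): countdown from index to 0
def pvALoop (file_str : List String) : Nat → Option String
  | 0 => pvACheck file_str 0 none
  | i + 1 => pvACheck file_str (i + 1) (pvALoop file_str i)

def determine_doc_type (index : Int) (file_str : List String) : Option String :=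
  if index < 0 then none else pvALoop file_str index.toNat

-- ===== PORT B =====
-- loop body: overwrite the accumulator on a hit (out-of-range i = IndexError, excluded by Pre_).
def pvBStep (file_str : List String) (res : Option String) (i : Int) : Option String :=
  match PySem.List.pyGet? file_str i with
  | none => res
  | some s =>
    if s = "COSC" then some "C"
    else if s = "MATH" then some "M"
    else if s = "MTED" then some "E"
    else res

def determine_doc_type_alt (index : Int) (file_str : List String) : Option String :=
  (PySem.List.pyRange 0 (index + 1) 1).foldl (pvBStep file_str) none

-- ===== PRECONDITION & SPEC =====
-- Pre_ excludes exactly the inputs where Python A raises IndexError: index ≥ len(file_str).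
def Pre_determine_doc_type (index : Int) (file_str : List String) : Prop :=
  index < (file_str.length : Int)
instance (index : Int) (file_str : List String) : Decidable (Pre_determine_doc_type index file_str) := by unfold Pre_determine_doc_type; infer_instance

def pvWitness_determine_doc_type : Int × List String := (1, ["MATH", "x"])

def Spec_determine_doc_type (index : Int) (file_str : List String) (out : Option String) : Prop := out = determine_doc_type_alt index file_str
instance (index : Int) (file_str : List String) (out : Option String) : Decidable (Spec_determine_doc_type index file_str out) := by unfold Spec_determine_doc_type; infer_instance

-- ===== CLAIM (what is proved, stated in full; the proofs are below) =====
def Claim_equal_determine_doc_type : Prop := ∀ (index : Int) (file_str : List String), Dom_determine_doc_type index file_str → Pre_determine_doc_type index file_str → Spec_determine_doc_type index file_str (determine_doc_type index file_str)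

-- ===== LEMMAS AND PROOFS =====

-- A's guarded branch chain equals B's unguarded one when the index is in range:
-- equality with a 4-letter literal already forces len = 4.
theorem pvCheck_eq_step (file_str : List String) (i : Nat) (k : Option String)
    (h : i < file_str.length) :
    pvACheck file_str i k = pvBStep file_str k (i : Int) := by
  unfold pvACheck pvBStep
  rw [PySem.List.pyGet?_natCast, List.getElem?_eq_getElem h]
  generalize file_str[i] = s
  by_cases hC : s = "COSC"
  · rw [hC]; simp
  · by_cases hM : s = "MATH"
    · rw [hM]; simp
    · by_cases hE : s = "MTED"
      · rw [hE]; simp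
      · simp [hC, hM, hE]

theorem pvLoop_eq_fold (file_str : List String) (n : Nat) (hn : n < file_str.length) :
    pvALoop file_str n
      = (PySem.List.pyRange 0 ((n : Int) + 1) 1).foldl (pvBStep file_str) none := by
  induction n with
  | zero =>
    rw [show ((0 : Nat) : Int) + 1 = 0 + 1 by norm_num, PySem.List.pyRange_one_singleton]
    simp only [List.foldl]
    have := pvCheck_eq_step file_str 0 none hn
    simpa [pvALoop] using this
  | succ m ih =>
    have hm : m < file_str.length := Nat.lt_of_succ_lt hn
    have hcast : ((m + 1 : Nat) : Int) + 1 = ((m : Int) + 1) + 1 := by push_cast; ring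
    rw [hcast, PySem.List.pyRange_one_succ_right (by positivity), List.foldl_append]
    simp only [List.foldl]
    rw [← ih hm]
    have := pvCheck_eq_step file_str (m + 1) (pvALoop file_str m) hn
    rw [show ((m : Int) + 1) = ((m + 1 : Nat) : Int) by push_cast; ring]
    simpa [pvALoop] using this

-- ===== VERDICT (by name: the statement is the Claim_ definition above) =====
theorem determine_doc_type_spec : Claim_equal_determine_doc_type := by
  intro index file_str _ hpre
  unfold Spec_determine_doc_type determine_doc_type determine_doc_type_alt
  by_cases hneg : index < 0
  · simp [hneg, PySem.List.pyRange_one_eq_nil (by omega : index + 1 ≤ 0)]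
  · have h0 : 0 ≤ index := le_of_not_gt hneg
    have hlt : index.toNat < file_str.length := by
      unfold Pre_determine_doc_type at hpre; omega
    rw [if_neg hneg, pvLoop_eq_fold file_str index.toNat hlt]
    congr 2
    omega
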